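-- pv_equiv track=rewrite | github.com/pypi-data/pypi-mirror-5 | packages/disco-dop/disco-dop-0.3pre1.tar.gz/disco-dop-0.3pre1/discodop/grammar.py | ranges
-- ===== SOURCE A (Python) =====
-- def ranges(s):
-- 	""" Partition s into a sequence of lists corresponding to contiguous ranges
--
-- 	>>> list(ranges( (0, 1, 3, 4, 6) ))
-- 	[[0, 1], [3, 4], [6]] """
-- 	rng = []
-- 	for a in s:
-- 		if not rng or a == rng[-1] + 1:
-- 			rng.append(a)
-- 		else:
-- 			yield rng
-- 			rng = [a]
-- 	if rng:
-- 		yield rng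
-- ===== SOURCE B (Python) =====
-- from itertools import groupby
--
--
-- def ranges(s):
--     """Partition s into a sequence of lists corresponding to contiguous ranges.
--
--     Consecutive integers share a constant value-minus-index key, so each
--     groupby group is exactly one contiguous range.
--     """
--     for _, grp in groupby(enumerate(s), key=lambda t: t[1] - t[0]):
--         yield [v for _, v in grp]
-- ===== Notes on version B (the rewrite author's own statement) =====
-- stated objective: idiomatic
-- what changed: Replaced the explicit rng accumulator with itertools.groupby over enumerate(s) keyed by value-minus-index, which is constant exactly on contiguous runs.
import Mathlib
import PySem

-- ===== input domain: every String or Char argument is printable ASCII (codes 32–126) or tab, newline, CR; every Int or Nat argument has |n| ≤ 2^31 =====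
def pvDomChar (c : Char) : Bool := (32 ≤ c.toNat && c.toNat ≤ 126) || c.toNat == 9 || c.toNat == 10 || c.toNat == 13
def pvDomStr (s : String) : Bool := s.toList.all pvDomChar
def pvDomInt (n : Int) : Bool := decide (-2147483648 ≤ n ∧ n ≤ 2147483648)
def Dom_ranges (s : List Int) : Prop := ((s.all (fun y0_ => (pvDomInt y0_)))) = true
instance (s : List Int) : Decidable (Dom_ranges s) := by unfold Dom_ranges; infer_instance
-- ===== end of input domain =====

-- B replaces A's explicit rng accumulator by grouping enumerate(s) on the value-minus-index key (idiomatic, same O(n) cost).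

-- ===== PORT A =====
-- A is a generator; its port returns the list of yielded values.
-- One step of A's loop body: state = (yielded so far, current rng).
def rangesStep (p : List (List Int) × List Int) (a : Int) : List (List Int) × List Int :=
  if p.2 = [] then (p.1, p.2 ++ [a])
  else if PySem.List.pyGet? p.2 (-1) = some (a - 1) then (p.1, p.2 ++ [a])
  else (p.1 ++ [p.2], [a])

def ranges (s : List Int) : List (List Int) :=
  let r := s.foldl rangesStep ([], [])
  if r.2 = [] then r.1 else r.1 ++ [r.2]

-- ===== PORT B =====
-- groupby(enumerate(s), key=lambda t: t[1] - t[0]): take the maximal prefix with the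
-- same key, then recurse on the rest (exactly itertools.groupby materialised).
def rangesGroups (l : List (Int × Int)) : List (List (Int × Int)) :=
  match l with
  | [] => []
  | (i, v) :: rest =>
    let p := rest.span (fun t => t.2 - t.1 = v - i)
    ((i, v) :: p.1) :: rangesGroups p.2
termination_by l.length
decreasing_by
  simp only [List.span_eq_takeWhile_dropWhile]
  have := List.length_dropWhile_le (p := fun t : Int × Int => decide (t.2 - t.1 = v - i)) (l := rest)
  simp; omega

def ranges_alt (s : List Int) : List (List Int) :=
  (rangesGroups (PySem.List.enumerate s)).map (fun g => g.map (fun t => t.2))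

-- ===== PRECONDITION & SPEC =====
def Spec_ranges (s : List Int) (out : List (List Int)) : Prop := out = ranges_alt s
instance (s : List Int) (out : List (List Int)) : Decidable (Spec_ranges s out) := by unfold Spec_ranges; infer_instance

-- ===== CLAIM (what is proved, stated in full; the proofs are below) =====
def Claim_equal_ranges : Prop := ∀ (s : List Int), Dom_ranges s → Spec_ranges s (ranges s)

-- ===== LEMMAS AND PROOFS =====

-- Reference decomposition: maximal successor run after a, and the chunks of s.
def pvRun (a : Int) : List Int → List Int × List Int
  | [] => ([], [])
  | b :: rest =>
    if b = a + 1 then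
      let p := pvRun b rest
      (b :: p.1, p.2)
    else ([], b :: rest)

theorem pvRun_len : ∀ (s : List Int) (a : Int), (pvRun a s).2.length ≤ s.length := by
  intro s
  induction s with
  | nil => intro a; simp [pvRun]
  | cons b rest ih =>
    intro a
    simp only [pvRun]
    split
    · exact Nat.le_succ_of_le (ih b)
    · simp

def pvChunks : List Int → List (List Int)
  | [] => []
  | a :: rest =>
    let p := pvRun a rest
    (a :: p.1) :: pvChunks p.2
termination_by s => s.length
decreasing_by
  have := pvRun_len rest a
  simp; omega

-- ---- A-side ----

theorem pyGet_last (pre : List Int) (a : Int) :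
    PySem.List.pyGet? (pre ++ [a]) (-1) = some a := by
  simp [PySem.List.pyGet?, PySem.List.pyIdx?]

theorem rangesStep_out (out : List (List Int)) (rng : List Int) (a : Int) :
    rangesStep (out, rng) a =
      (out ++ (rangesStep ([], rng) a).1, (rangesStep ([], rng) a).2) := by
  unfold rangesStep
  split_ifs <;> simp_all

theorem foldl_out_append (s : List Int) : ∀ (out : List (List Int)) (rng : List Int),
    s.foldl rangesStep (out, rng) =
      (out ++ (s.foldl rangesStep ([], rng)).1, (s.foldl rangesStep ([], rng)).2) := by
  induction s with
  | nil => intro out rng; simp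
  | cons a rest ih =>
    intro out rng
    simp only [List.foldl_cons]
    rw [rangesStep_out out rng a]
    rcases hp : rangesStep ([], rng) a with ⟨X, Y⟩
    rw [ih (out ++ X) Y, ih X Y]
    simp

def pvFin (r : List (List Int) × List Int) : List (List Int) :=
  if r.2 = [] then r.1 else r.1 ++ [r.2]

theorem pvFin_append (o1 : List (List Int)) (q : List (List Int) × List Int) :
    pvFin (o1 ++ q.1, q.2) = o1 ++ pvFin q := by
  unfold pvFin
  split <;> simp_all

theorem A_main : ∀ (s : List Int) (pre : List Int) (a : Int),
    pvFin (s.foldl rangesStep ([], pre ++ [a])) =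
      ((pre ++ [a]) ++ (pvRun a s).1) :: pvChunks (pvRun a s).2 := by
  intro s
  induction s with
  | nil => intro pre a; simp [pvFin, pvRun, pvChunks]
  | cons b rest ih =>
    intro pre a
    simp only [List.foldl_cons]
    by_cases hb : b = a + 1
    · rw [show rangesStep ([], pre ++ [a]) b = ([], (pre ++ [a]) ++ [b]) by
        simp [rangesStep, hb]]
      rw [ih (pre ++ [a]) b]
      simp [pvRun, hb]
    · rw [show rangesStep ([], pre ++ [a]) b = ([pre ++ [a]], [b]) by
        unfold rangesStep
        rw [if_neg (by simp), pyGet_last,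
            if_neg (by simp only [Option.some.injEq]; omega)]
        simp]
      rw [show ([pre ++ [a]] : List (List Int)) = [pre ++ [a]] ++ [] from by simp] at *
      rw [foldl_out_append rest ([pre ++ [a]] ++ []) [b], pvFin_append]
      have hrec := ih [] b
      simp only [List.nil_append] at hrec
      rw [hrec]
      simp only [pvRun, if_neg hb]
      rw [pvChunks]
      simp

theorem ranges_eq_chunks (s : List Int) : ranges s = pvChunks s := by
  cases s with
  | nil => simp [ranges, pvChunks]
  | cons a rest =>
    have h : ranges (a :: rest) = pvFin ((a :: rest).foldl rangesStep ([], [])) := by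
      simp [ranges, pvFin]
    rw [h]
    simp only [List.foldl_cons]
    rw [show rangesStep ([], []) a = ([], [] ++ [a]) by simp [rangesStep]]
    rw [A_main rest [] a]
    simp [pvChunks]

-- ---- B-side ----

theorem takeWhile_enum : ∀ (s : List Int) (a n : Int),
    (PySem.List.enumerate s (n + 1)).takeWhile
        (fun t : Int × Int => decide (t.2 - t.1 = a - n)) =
      PySem.List.enumerate (pvRun a s).1 (n + 1) := by
  intro s
  induction s with
  | nil => intro a n; simp [pvRun, PySem.List.enumerate_nil]
  | cons b rest ih =>
    intro a n
    rw [PySem.List.enumerate_cons]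
    by_cases hb : b = a + 1
    · subst hb
      rw [List.takeWhile_cons_of_pos (by simp)]
      have e : a - n = (a + 1) - (n + 1) := by ring
      rw [e, ih (a + 1) (n + 1)]
      simp [pvRun, PySem.List.enumerate_cons]
    · rw [List.takeWhile_cons_of_neg (by simp; omega)]
      simp [pvRun, hb, PySem.List.enumerate_nil]

theorem dropWhile_enum : ∀ (s : List Int) (a n : Int),
    (PySem.List.enumerate s (n + 1)).dropWhile
        (fun t : Int × Int => decide (t.2 - t.1 = a - n)) =
      PySem.List.enumerate (pvRun a s).2 (n + 1 + ((pvRun a s).1.length : Int)) := by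
  intro s
  induction s with
  | nil => intro a n; simp [pvRun, PySem.List.enumerate_nil]
  | cons b rest ih =>
    intro a n
    rw [PySem.List.enumerate_cons]
    by_cases hb : b = a + 1
    · subst hb
      rw [List.dropWhile_cons_of_pos (by simp)]
      have e : a - n = (a + 1) - (n + 1) := by ring
      rw [e, ih (a + 1) (n + 1)]
      simp only [pvRun, if_true]
      congr 1
      simp only [List.length_cons]
      push_cast
      ring
    · rw [List.dropWhile_cons_of_neg (by simp; omega)]
      simp [pvRun, hb, PySem.List.enumerate_cons]

theorem B_main : ∀ (k : Nat) (s : List Int), s.length ≤ k → ∀ (n : Int),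
    (rangesGroups (PySem.List.enumerate s n)).map (fun g => g.map (fun t => t.2)) =
      pvChunks s := by
  intro k
  induction k with
  | zero =>
    intro s hs n
    have hnil : s = [] := by cases s <;> simp_all
    subst hnil
    simp [PySem.List.enumerate_nil, rangesGroups, pvChunks]
  | succ k ih =>
    intro s hs n
    cases s with
    | nil => simp [PySem.List.enumerate_nil, rangesGroups, pvChunks]
    | cons a rest =>
      rw [PySem.List.enumerate_cons, rangesGroups]
      simp only [List.span_eq_takeWhile_dropWhile]
      rw [takeWhile_enum rest a n, dropWhile_enum rest a n]
      simp only [List.map_cons]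
      rw [ih (pvRun a rest).2
        (by have := pvRun_len rest a; simp at hs; omega) (n + 1 + ((pvRun a rest).1.length : Int))]
      rw [pvChunks]
      simp [PySem.List.map_snd_enumerate]

theorem ranges_alt_eq_chunks (s : List Int) : ranges_alt s = pvChunks s := by
  unfold ranges_alt
  exact B_main s.length s le_rfl 0

-- ===== VERDICT (by name: the statement is the Claim_ definition above) =====
theorem ranges_spec : Claim_equal_ranges := by
  intro s _
  unfold Spec_ranges
  rw [ranges_eq_chunks, ranges_alt_eq_chunks]
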